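-- pv_equiv track=rewrite | github.com/jonasjaeger-sci/pyretis_venv | examples/11_LAMMPS/init_traj/generate_load.py | find_zero_minus_trajectory
-- ===== SOURCE A (Python) =====
-- def find_zero_minus_trajectory(op_values, lambda0):
--     """
--     Find a [0-] trajectory: starts above lambda_0, dips below, comes back above.
--     Returns (start_idx, end_idx) into op_values, or None if not found.
--     """
--     n = len(op_values)
--     for start in range(n):
--         if op_values[start] > lambda0:
--             # look for a dip below lambda0 then return above
--             went_below = False
--             for mid in range(start + 1, n):
--                 if op_values[mid] < lambda0:
--                     went_below = True
--                 if went_below and op_values[mid] > lambda0: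
--                     # valid [0-] segment found
--                     return (start, mid)
--     return None
-- ===== SOURCE B (Python) =====
-- def find_zero_minus_trajectory(op_values, lambda0):
--     """
--     Find a [0-] trajectory: starts above lambda_0, dips below, comes back above.
--     Single left-to-right pass as a three-state machine:
--       state 0: looking for the start point (first value above lambda0);
--       state 1: start fixed, waiting for a dip below lambda0;
--       state 2: dipped, waiting for the return above lambda0.
--     """
--     state = 0
--     start = 0
--     for i, v in enumerate(op_values):
--         if state == 0:
--             if v > lambda0:
--                 start = i
--                 state = 1
--         else:
--             if v < lambda0:
--                 state = 2
--             if state == 2 and v > lambda0: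
--                 return (start, i)
--     return None
-- ===== Notes on version B (the rewrite author's own statement) =====
-- stated objective: faster
-- what changed: Replaced the quadratic nested scan (restarting an inner dip-search for every start above lambda0) by a single linear pass organised as a three-state machine (seek start / seek dip / seek return); a later start can only succeed if the first one does, so one pass suffices.
import Mathlib
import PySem

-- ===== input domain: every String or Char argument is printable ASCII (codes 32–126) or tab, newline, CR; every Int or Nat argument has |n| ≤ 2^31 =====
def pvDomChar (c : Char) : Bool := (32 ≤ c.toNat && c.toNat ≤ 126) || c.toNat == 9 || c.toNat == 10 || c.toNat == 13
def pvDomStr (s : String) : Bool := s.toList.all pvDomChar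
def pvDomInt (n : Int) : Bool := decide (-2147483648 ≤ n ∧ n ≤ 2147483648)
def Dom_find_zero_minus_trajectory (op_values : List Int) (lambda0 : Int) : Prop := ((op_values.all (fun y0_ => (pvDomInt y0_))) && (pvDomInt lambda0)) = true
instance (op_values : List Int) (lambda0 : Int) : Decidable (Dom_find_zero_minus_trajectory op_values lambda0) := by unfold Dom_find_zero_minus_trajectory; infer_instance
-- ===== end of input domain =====

-- B replaces A's quadratic nested scan by a single-pass three-state machine (asymptotically faster).

-- ===== PORT A =====
-- inner loop: 'for mid in range(start+1, n)' carrying went_below; early return on success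
def fzmInnerA (op_values : List Int) (lambda0 : Int) (start : Int) :
    List Int → Bool → Option (Int × Int)
  | [], _ => none
  | m :: mids, went_below =>
    let v := PySem.List.pyGetD op_values m 0   -- op_values[mid]; m drawn from range(start+1, n), always in bounds
    let went_below := if v < lambda0 then true else went_below
    if went_below && decide (v > lambda0) then some (start, m)
    else fzmInnerA op_values lambda0 start mids went_below

-- outer loop: 'for start in range(n)'
def fzmOuterA (op_values : List Int) (lambda0 : Int) : List Int → Option (Int × Int)
  | [] => none
  | s :: starts =>
    if PySem.List.pyGetD op_values s 0 > lambda0 then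
      match fzmInnerA op_values lambda0 s
          (PySem.List.pyRange (s + 1) (PySem.List.len op_values) 1) false with
      | some r => some r
      | none => fzmOuterA op_values lambda0 starts
    else fzmOuterA op_values lambda0 starts

def find_zero_minus_trajectory (op_values : List Int) (lambda0 : Int) : Option (Int × Int) :=
  fzmOuterA op_values lambda0 (PySem.List.pyRange 0 (PySem.List.len op_values) 1)

-- ===== PORT B =====
-- 'for i, v in enumerate(op_values)' as structural recursion carrying the index i,
-- the recorded start and the state (0 = seek start, 1 = seek dip, 2 = dipped)
def fzmGoB (lambda0 : Int) (i start : Int) (state : Nat) :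
    List Int → Option (Int × Int)
  | [] => none
  | v :: rest =>
    if state == 0 then
      if v > lambda0 then fzmGoB lambda0 (i + 1) i 1 rest
      else fzmGoB lambda0 (i + 1) start 0 rest
    else
      let state := if v < lambda0 then 2 else state
      if state == 2 && decide (v > lambda0) then some (start, i)
      else fzmGoB lambda0 (i + 1) start state rest

def find_zero_minus_trajectory_alt (op_values : List Int) (lambda0 : Int) : Option (Int × Int) :=
  fzmGoB lambda0 0 0 0 op_values

-- ===== PRECONDITION & SPEC =====
def Spec_find_zero_minus_trajectory (op_values : List Int) (lambda0 : Int) (out : Option (Int × Int)) : Prop := out = find_zero_minus_trajectory_alt op_values lambda0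
instance (op_values : List Int) (lambda0 : Int) (out : Option (Int × Int)) : Decidable (Spec_find_zero_minus_trajectory op_values lambda0 out) := by unfold Spec_find_zero_minus_trajectory; infer_instance

-- ===== CLAIM (what is proved, stated in full; the proofs are below) =====
def Claim_equal_find_zero_minus_trajectory : Prop := ∀ (op_values : List Int) (lambda0 : Int), Dom_find_zero_minus_trajectory op_values lambda0 → Spec_find_zero_minus_trajectory op_values lambda0 (find_zero_minus_trajectory op_values lambda0)

-- ===== LEMMAS AND PROOFS =====

-- Reference inner scan over the actual value list (proof device)
def scanI (lambda0 start : Int) : Int → Bool → List Int → Option (Int × Int)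
  | _, _, [] => none
  | i, wb, v :: rest =>
    let wb := if v < lambda0 then true else wb
    if wb && decide (v > lambda0) then some (start, i)
    else scanI lambda0 start (i + 1) wb rest

-- "no valid segment in this tail given flag wb" (depends only on lambda0, wb, tail)
def noSeg (lambda0 : Int) : Bool → List Int → Bool
  | _, [] => true
  | wb, v :: rest =>
    let wb := if v < lambda0 then true else wb
    (!(wb && decide (v > lambda0))) && noSeg lambda0 wb rest

-- Reference outer loop over the value list (proof device)
def outerR (lambda0 : Int) : Int → List Int → Option (Int × Int)
  | _, [] => none
  | k, v :: rest =>
    if v > lambda0 then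
      match scanI lambda0 k (k + 1) false rest with
      | some r => some r
      | none => outerR lambda0 (k + 1) rest
    else outerR lambda0 (k + 1) rest

lemma scanI_none_iff (lambda0 start : Int) :
    ∀ (xs : List Int) (i : Int) (wb : Bool),
      scanI lambda0 start i wb xs = none ↔ noSeg lambda0 wb xs = true := by
  intro xs
  induction xs with
  | nil => intro i wb; simp [scanI, noSeg]
  | cons v rest ih =>
    intro i wb
    simp only [scanI, noSeg]
    by_cases h : ((if v < lambda0 then true else wb) && decide (v > lambda0)) = true
    · rw [if_pos h, h]
      simp
    · have hb : ((if v < lambda0 then true else wb) && decide (v > lambda0)) = false := by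
        revert h; cases ((if v < lambda0 then true else wb) && decide (v > lambda0)) <;> simp
      rw [if_neg h, hb, ih]
      simp

lemma noSeg_mono (lambda0 : Int) :
    ∀ (xs : List Int), noSeg lambda0 true xs = true → noSeg lambda0 false xs = true := by
  intro xs
  induction xs with
  | nil => simp [noSeg]
  | cons v rest ih =>
    simp only [noSeg]
    by_cases hv : v < lambda0
    · simp [hv]
    · by_cases ha : v > lambda0
      · simp [hv, ha]
      · simp [hv, ha]; exact ih

-- any wb implies the false version
lemma noSeg_false_of (lambda0 : Int) (wb : Bool) (xs : List Int)
    (h : noSeg lambda0 wb xs = true) : noSeg lambda0 false xs = true := by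
  cases wb with
  | false => exact h
  | true => exact noSeg_mono lambda0 xs h

-- if no segment exists in the tail (with wb = false), the whole outer loop fails
lemma outerR_none (lambda0 : Int) :
    ∀ (xs : List Int) (k : Int),
      noSeg lambda0 false xs = true → outerR lambda0 k xs = none := by
  intro xs
  induction xs with
  | nil => intro k _; simp [outerR]
  | cons v rest ih =>
    intro k h
    simp only [noSeg] at h
    by_cases ha : v > lambda0
    · have hv : ¬ v < lambda0 := by omega
      simp only [hv, if_false] at h
      simp only [Bool.and_eq_true, Bool.not_eq_true'] at h
      have hrest : noSeg lambda0 false rest = true := h.2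
      have hscan : scanI lambda0 k (k + 1) false rest = none :=
        (scanI_none_iff lambda0 k rest (k + 1) false).mpr hrest
      simp only [outerR, if_pos ha, hscan]
      exact ih (k + 1) hrest
    · simp only [outerR, if_neg ha]
      have hrest : noSeg lambda0 false rest = true := by
        have := (Bool.and_eq_true _ _).mp h
        exact noSeg_false_of lambda0 _ rest this.2
      exact ih (k + 1) hrest

-- B's states 1/2 are exactly scanI with wb = (state == 2)
lemma fzmGoB_scan (lambda0 : Int) :
    ∀ (xs : List Int) (i start : Int) (wb : Bool),
      fzmGoB lambda0 i start (if wb then 2 else 1) xs = scanI lambda0 start i wb xs := by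
  intro xs
  induction xs with
  | nil => intro i start wb; cases wb <;> simp [fzmGoB, scanI]
  | cons v rest ih =>
    intro i start wb
    have e1 : fzmGoB lambda0 (i + 1) start 1 rest = scanI lambda0 start (i + 1) false rest := by
      simpa using ih (i + 1) start false
    have e2 : fzmGoB lambda0 (i + 1) start 2 rest = scanI lambda0 start (i + 1) true rest := by
      simpa using ih (i + 1) start true
    have hstate : ((if wb then (2:Nat) else 1) == 0) = false := by cases wb <;> decide
    simp only [fzmGoB, scanI, hstate, if_false, Bool.false_eq_true]
    by_cases hv : v < lambda0
    · by_cases ha : v > lambda0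
      · omega
      · cases wb <;> simp [hv, ha, e2]
    · by_cases ha : v > lambda0
      · cases wb <;> simp [hv, ha, e1]
      · cases wb <;> simp [hv, ha, e1, e2]

-- B equals the reference outer loop
lemma fzmGoB_outerR (lambda0 : Int) :
    ∀ (xs : List Int) (k start : Int),
      fzmGoB lambda0 k start 0 xs = outerR lambda0 k xs := by
  intro xs
  induction xs with
  | nil => intro k start; simp [fzmGoB, outerR]
  | cons v rest ih =>
    intro k start
    by_cases ha : v > lambda0
    · simp only [fzmGoB, outerR, if_pos ha]
      have h1 : fzmGoB lambda0 (k + 1) k 1 rest = scanI lambda0 k (k + 1) false rest := by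
        simpa using fzmGoB_scan lambda0 rest (k + 1) k false
      simp only [show ((0:Nat) == 0) = true from rfl, if_true, h1]
      cases hs : scanI lambda0 k (k + 1) false rest with
      | some r => rfl
      | none =>
        have hrest : noSeg lambda0 false rest = true :=
          (scanI_none_iff lambda0 k rest (k + 1) false).mp hs
        exact (outerR_none lambda0 rest (k + 1) hrest).symm
    · simp only [fzmGoB, outerR, if_neg ha]
      simp only [show ((0:Nat) == 0) = true from rfl, if_true]
      exact ih (k + 1) start

-- A's inner loop over range(k, n) equals scanI over the dropped tail
lemma fzmInnerA_scan (op_values : List Int) (lambda0 start : Int) :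
    ∀ (k : Nat) (wb : Bool),
      fzmInnerA op_values lambda0 start
        (PySem.List.pyRange (k : Int) (PySem.List.len op_values) 1) wb
      = scanI lambda0 start (k : Int) wb (op_values.drop k) := by
  intro k
  induction hk : op_values.length - k generalizing k with
  | zero =>
    intro wb
    have hge : op_values.length ≤ k := by omega
    have hnil : PySem.List.pyRange (k : Int) (PySem.List.len op_values) = [] := by
      rw [PySem.List.pyRange_one, PySem.List.len_eq]
      have : ((op_values.length : Int) - (k : Int)).toNat = 0 := by omega
      rw [this]; rfl
    rw [hnil, List.drop_eq_nil_of_le hge]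
    simp [fzmInnerA, scanI]
  | succ m ih =>
    intro wb
    have hlt : k < op_values.length := by omega
    have h1 : (k : Int) < PySem.List.len op_values := by
      rw [PySem.List.len_eq]; exact_mod_cast hlt
    rw [PySem.List.pyRange_one_cons h1]
    have hdrop : op_values.drop k = op_values[k] :: op_values.drop (k + 1) :=
      List.drop_eq_getElem_cons hlt
    have hget : PySem.List.pyGetD op_values (k : Int) 0 = op_values[k] := by
      rw [PySem.List.pyGetD_natCast]; exact List.getD_eq_getElem _ _ hlt
    rw [hdrop]
    simp only [fzmInnerA, scanI, hget]
    have hrec := ih (k + 1) (by omega) (if op_values[k] < lambda0 then true else wb)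
    push_cast at hrec
    rw [hrec]
  
-- A's outer loop over range(k, n) equals the reference outer loop over the dropped tail
lemma fzmOuterA_outerR (op_values : List Int) (lambda0 : Int) :
    ∀ (k : Nat),
      fzmOuterA op_values lambda0
        (PySem.List.pyRange (k : Int) (PySem.List.len op_values) 1)
      = outerR lambda0 (k : Int) (op_values.drop k) := by
  intro k
  induction hk : op_values.length - k generalizing k with
  | zero =>
    have hge : op_values.length ≤ k := by omega
    have hnil : PySem.List.pyRange (k : Int) (PySem.List.len op_values) = [] := by
      rw [PySem.List.pyRange_one, PySem.List.len_eq]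
      have : ((op_values.length : Int) - (k : Int)).toNat = 0 := by omega
      rw [this]; rfl
    rw [hnil, List.drop_eq_nil_of_le hge]
    simp [fzmOuterA, outerR]
  | succ m ih =>
    have hlt : k < op_values.length := by omega
    have h1 : (k : Int) < PySem.List.len op_values := by
      rw [PySem.List.len_eq]; exact_mod_cast hlt
    rw [PySem.List.pyRange_one_cons h1]
    have hdrop : op_values.drop k = op_values[k] :: op_values.drop (k + 1) :=
      List.drop_eq_getElem_cons hlt
    have hget : PySem.List.pyGetD op_values (k : Int) 0 = op_values[k] := by
      rw [PySem.List.pyGetD_natCast]; exact List.getD_eq_getElem _ _ hlt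
    rw [hdrop]
    simp only [fzmOuterA, outerR, hget]
    by_cases ha : op_values[k] > lambda0
    · simp only [if_pos ha]
      have hinner := fzmInnerA_scan op_values lambda0 (k : Int) (k + 1) false
      push_cast at hinner
      rw [hinner]
      cases hs : scanI lambda0 (k : Int) ((k : Int) + 1) false (op_values.drop (k + 1)) with
      | some r => rfl
      | none =>
        have hrec := ih (k + 1) (by omega)
        push_cast at hrec
        exact hrec
    · simp only [if_neg ha]
      have hrec := ih (k + 1) (by omega)
      push_cast at hrec
      exact hrec

-- ===== VERDICT (by name: the statement is the Claim_ definition above) =====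
theorem find_zero_minus_trajectory_spec : Claim_equal_find_zero_minus_trajectory := by
  intro op_values lambda0 _
  unfold Spec_find_zero_minus_trajectory
  unfold find_zero_minus_trajectory find_zero_minus_trajectory_alt
  have hA := fzmOuterA_outerR op_values lambda0 0
  have hB := fzmGoB_outerR lambda0 op_values 0 0
  simp only [Nat.cast_zero, List.drop_zero] at hA
  rw [hA, hB]
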